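-- pv_equiv track=rewrite | github.com/danielnrainer/CIVET | src/utils/cif_dictionary_manager.py | _resolve_simple_field_conflict
-- ===== SOURCE A (Python) =====
-- from typing import Dict, List, Optional, Set, Tuple, Any
--
-- def _resolve_simple_field_conflict(cif_content: str, alias_list: List[str],
--                                    chosen_field: str, chosen_value: str) -> Tuple[str, List[str]]:
--     """
--     Resolve conflicts for simple (non-loop) fields by replacing in-place.
--
--     Finds the first occurrence of any alias field and replaces it with the chosen field,
--     then removes all other occurrences.
--
--     Important: This method respects text blocks (semicolon-delimited) and will NOT
--     remove or modify field-like text within blocks such as _iucr_refine_fcf_details.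
--
--     Args:
--         cif_content: CIF file content
--         alias_list: List of conflicting field names (aliases)
--         chosen_field: The field name to use for resolution
--         chosen_value: The value to use
--
--     Returns:
--         Tuple of (resolved_content, list_of_changes)
--     """
--     changes = []
--     lines = cif_content.split('\n')
--     result_lines = []
--     first_occurrence_replaced = False
--     fields_to_remove = set(alias_list)  # Track which fields to remove
--     in_text_block = False
--
--     # Format the chosen value properly
--     if chosen_value and chosen_value.strip() and chosen_value != "(loop data)":
--         if ' ' in chosen_value or ',' in chosen_value or '[' in chosen_value or ']' in chosen_value or '{' in chosen_value or '}' in chosen_value: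
--             if not (chosen_value.startswith("'") and chosen_value.endswith("'")):
--                 formatted_value = f"'{chosen_value}'"
--             else:
--                 formatted_value = chosen_value
--         else:
--             formatted_value = chosen_value
--     else:
--         formatted_value = "?"
--
--     i = 0
--     while i < len(lines):
--         line = lines[i]
--         line_stripped = line.strip()
--
--         # Track text block boundaries (e.g., _iucr_refine_fcf_details blocks)
--         if line_stripped == ';':
--             in_text_block = not in_text_block
--             result_lines.append(line)
--             i += 1
--             continue
--
--         # Don't modify anything inside text blocks
--         if in_text_block:
--             result_lines.append(line)
--             i += 1
--             continue
--
--         # Check if this line contains any of the conflicting fields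
--         found_conflict = False
--         for alias in fields_to_remove:
--             if line_stripped.startswith(alias + ' ') or line_stripped == alias:
--                 found_conflict = True
--
--                 if not first_occurrence_replaced:
--                     # Replace the first occurrence in-place
--                     indent = line[:len(line) - len(line.lstrip())]
--                     result_lines.append(f"{indent}{chosen_field} {formatted_value}")
--                     first_occurrence_replaced = True
--                     changes.append(f"Replaced '{alias}' with '{chosen_field}' (value: '{formatted_value}')")
--
--                     # Skip multiline value if present
--                     if i + 1 < len(lines) and not lines[i + 1].strip().startswith('_'):
--                         i += 1  # Skip the value line
--                 else:
--                     # Remove subsequent occurrences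
--                     changes.append(f"Removed duplicate field '{alias}'")
--
--                     # Skip multiline value if present
--                     if i + 1 < len(lines) and not lines[i + 1].strip().startswith('_'):
--                         i += 1  # Skip the value line
--
--                 break  # Found and processed the conflict, move to next line
--
--         if not found_conflict:
--             # Keep lines that are not conflicting fields
--             result_lines.append(line)
--
--         i += 1
--
--     resolved_content = '\n'.join(result_lines)
--     return resolved_content, changes
-- ===== SOURCE B (Python) =====
-- from typing import List, Tuple
--
-- def _resolve_simple_field_conflict(cif_content: str, alias_list: List[str],
--                                    chosen_field: str, chosen_value: str) -> Tuple[str, List[str]]: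
--     """Two-pass rewrite: pass 1 tags every line (copy / flagged-conflict, consuming
--     its value line); pass 2 renders output lines and change messages from the tags."""
--     aliases = list(dict.fromkeys(alias_list))  # distinct aliases, first-occurrence order
--
--     # Format the chosen value
--     if chosen_value and chosen_value.strip() and chosen_value != "(loop data)":
--         if any(c in chosen_value for c in " ,[]{}") and not (
--                 chosen_value.startswith("'") and chosen_value.endswith("'")):
--             formatted_value = "'" + chosen_value + "'"
--         else:
--             formatted_value = chosen_value
--     else:
--         formatted_value = "?"
--
--     def matching(ls):
--         for a in aliases:
--             if ls.startswith(a + ' ') or ls == a: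
--                 return a
--         return None
--
--     # Pass 1: tag lines. ('copy', line) or ('flag', line, alias); a flagged line
--     # whose next line does not start with '_' consumes that value line.
--     lines = cif_content.split('\n')
--     n = len(lines)
--     tags = []
--     in_text = False
--     k = 0
--     while k < n:
--         line = lines[k]
--         ls = line.strip()
--         if ls == ';':
--             in_text = not in_text
--             tags.append(('copy', line, None))
--         elif in_text:
--             tags.append(('copy', line, None))
--         else:
--             a = matching(ls)
--             if a is None:
--                 tags.append(('copy', line, None))
--             else:
--                 tags.append(('flag', line, a))
--                 if k + 1 < n and not lines[k + 1].strip().startswith('_'):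
--                     k += 1  # value line: consumed, never re-examined
--         k += 1
--
--     # Pass 2: render
--     out = []
--     changes = []
--     first = True
--     for kind, line, a in tags:
--         if kind == 'copy':
--             out.append(line)
--         elif first:
--             indent = line[:len(line) - len(line.lstrip())]
--             out.append(f"{indent}{chosen_field} {formatted_value}")
--             changes.append(f"Replaced '{a}' with '{chosen_field}' (value: '{formatted_value}')")
--             first = False
--         else:
--             changes.append(f"Removed duplicate field '{a}'")
--     return '\n'.join(out), changes
-- ===== Notes on version B (the rewrite author's own statement) =====
-- stated objective: alternative
-- what changed: A's single interleaved while-loop (set membership, in-place first/duplicate handling, manual index skipping) is replaced by a two-pass decomposition: a tagging pass labels each line copy/flagged-conflict (consuming its value line) against an insertion-ordered dedup of the aliases, and a separate rendering pass turns the tags into output lines and change messages.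
import Mathlib
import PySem

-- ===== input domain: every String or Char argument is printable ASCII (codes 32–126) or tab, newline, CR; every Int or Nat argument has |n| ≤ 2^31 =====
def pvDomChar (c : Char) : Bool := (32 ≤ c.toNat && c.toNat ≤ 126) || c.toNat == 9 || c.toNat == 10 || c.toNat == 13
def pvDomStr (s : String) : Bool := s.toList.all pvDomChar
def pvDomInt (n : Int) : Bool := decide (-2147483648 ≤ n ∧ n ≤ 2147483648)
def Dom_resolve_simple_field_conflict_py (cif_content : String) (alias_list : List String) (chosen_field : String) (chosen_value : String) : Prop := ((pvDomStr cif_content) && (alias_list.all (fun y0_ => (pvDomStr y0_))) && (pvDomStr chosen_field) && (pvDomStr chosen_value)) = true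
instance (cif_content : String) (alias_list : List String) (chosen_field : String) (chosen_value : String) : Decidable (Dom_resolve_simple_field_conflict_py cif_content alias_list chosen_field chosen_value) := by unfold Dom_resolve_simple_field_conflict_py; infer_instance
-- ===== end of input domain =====

-- B replaces A's single interleaved rewrite loop by a tagging pass plus a rendering pass
-- (objective: alternative decomposition, same asymptotic cost). Return-value equivalence only;
-- neither program mutates its arguments.

-- ===== PORT A =====

-- A's formatted_value computation (the or-chain of membership tests, verbatim)
def pvA_formatted (chosen_value : String) : String :=
  if chosen_value ≠ "" ∧ PySem.Str.strip chosen_value ≠ "" ∧ chosen_value ≠ "(loop data)" then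
    if PySem.Str.isIn " " chosen_value || PySem.Str.isIn "," chosen_value ||
       PySem.Str.isIn "[" chosen_value || PySem.Str.isIn "]" chosen_value ||
       PySem.Str.isIn "{" chosen_value || PySem.Str.isIn "}" chosen_value then
      if !(PySem.Str.startswith chosen_value "'" && PySem.Str.endswith chosen_value "'") then
        "'" ++ chosen_value ++ "'"
      else chosen_value
    else chosen_value
  else "?"

-- A's 'skip multiline value' step: drop lines[i+1] when it exists and does not start with '_'
def pvA_skipValue : List String → List String
  | [] => []
  | next :: tl => if !(PySem.Str.startswith (PySem.Str.strip next) "_") then tl else next :: tl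

theorem pvA_skipValue_length_le (rest : List String) : (pvA_skipValue rest).length ≤ rest.length := by
  cases rest with
  | nil => simp [pvA_skipValue]
  | cons next tl => simp [pvA_skipValue]; split <;> simp

-- A's while-loop, step for step: state = (remaining lines, first_occurrence_replaced, in_text_block),
-- returns (result_lines, changes). The 'for alias in fields_to_remove: … break' is ported as find?
-- over PySem.Set.ofList alias_list (Python's set iteration order is not modelled; Pre_ below
-- guarantees at most one alias matches a line, making the first hit order-independent).
def pvA_loop (fields : List String) (chosen_field fval : String) :
    List String → Bool → Bool → List String × List String
  | [], _, _ => ([], [])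
  | line :: rest, fr, itb =>
    let ls := PySem.Str.strip line
    if ls = ";" then
      let r := pvA_loop fields chosen_field fval rest fr (!itb)
      (line :: r.1, r.2)
    else if itb then
      let r := pvA_loop fields chosen_field fval rest fr itb
      (line :: r.1, r.2)
    else
      match fields.find? (fun a => PySem.Str.startswith ls (a ++ " ") || ls == a) with
      | none =>
        let r := pvA_loop fields chosen_field fval rest fr itb
        (line :: r.1, r.2)
      | some al =>
        if !fr then
          let indent := PySem.Str.slice line none
            (some (PySem.Str.len line - PySem.Str.len (PySem.Str.lstrip line)))
          let r := pvA_loop fields chosen_field fval (pvA_skipValue rest) true itb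
          ((indent ++ chosen_field ++ " " ++ fval) :: r.1,
           ("Replaced '" ++ al ++ "' with '" ++ chosen_field ++ "' (value: '" ++ fval ++ "')") :: r.2)
        else
          let r := pvA_loop fields chosen_field fval (pvA_skipValue rest) fr itb
          (r.1, ("Removed duplicate field '" ++ al ++ "'") :: r.2)
termination_by lines _ _ => lines.length
decreasing_by
  · simp
  · simp
  · simp
  · exact Nat.lt_succ_of_le (pvA_skipValue_length_le rest)
  · exact Nat.lt_succ_of_le (pvA_skipValue_length_le rest)

def resolve_simple_field_conflict_py (cif_content : String) (alias_list : List String) (chosen_field : String) (chosen_value : String) : String × List String :=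
  let lines := (PySem.Str.split? cif_content "\n").getD []   -- '\n' ≠ "": split? is always some here
  let fields := PySem.Set.ofList alias_list
  let fval := pvA_formatted chosen_value
  let r := pvA_loop fields chosen_field fval lines false false
  (PySem.Str.join "\n" r.1, r.2)

-- ===== PORT B =====

-- B's formatted value: any() over the candidate characters, one combined condition
def pvB_formatted (chosen_value : String) : String :=
  if chosen_value ≠ "" ∧ PySem.Str.strip chosen_value ≠ "" ∧ chosen_value ≠ "(loop data)" then
    if ([" ", ",", "[", "]", "{", "}"].any (fun c => PySem.Str.isIn c chosen_value)) &&
       !(PySem.Str.startswith chosen_value "'" && PySem.Str.endswith chosen_value "'") then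
      "'" ++ chosen_value ++ "'"
    else chosen_value
  else "?"

inductive PvTag where
  | copy : String → PvTag
  | flag : String → String → PvTag
deriving DecidableEq, Repr

-- B's pass 1: tag every line; a flagged line consumes its value line (next line not starting '_')
def pvB_tag (aliases : List String) : List String → Bool → List PvTag
  | [], _ => []
  | line :: rest, itb =>
    let ls := PySem.Str.strip line
    if ls = ";" then PvTag.copy line :: pvB_tag aliases rest (!itb)
    else if itb then PvTag.copy line :: pvB_tag aliases rest itb
    else
      match aliases.find? (fun a => PySem.Str.startswith ls (a ++ " ") || ls == a) with
      | none => PvTag.copy line :: pvB_tag aliases rest itb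
      | some a =>
        PvTag.flag line a ::
          pvB_tag aliases
            (match rest with
             | [] => []
             | next :: tl =>
               if !(PySem.Str.startswith (PySem.Str.strip next) "_") then tl else next :: tl)
            itb
termination_by lines _ => lines.length
decreasing_by
  · simp
  · simp
  · simp
  · cases rest with
    | nil => simp
    | cons next tl => simp; split <;> simp

-- B's pass 2: render output lines and change messages from the tags
def pvB_render (chosen_field fval : String) : List PvTag → Bool → List String × List String
  | [], _ => ([], [])
  | PvTag.copy line :: rest, first =>
    let r := pvB_render chosen_field fval rest first
    (line :: r.1, r.2)
  | PvTag.flag line a :: rest, first =>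
    if first then
      let indent := PySem.Str.slice line none
        (some (PySem.Str.len line - PySem.Str.len (PySem.Str.lstrip line)))
      let r := pvB_render chosen_field fval rest false
      ((indent ++ chosen_field ++ " " ++ fval) :: r.1,
       ("Replaced '" ++ a ++ "' with '" ++ chosen_field ++ "' (value: '" ++ fval ++ "')") :: r.2)
    else
      let r := pvB_render chosen_field fval rest false
      (r.1, ("Removed duplicate field '" ++ a ++ "'") :: r.2)

def resolve_simple_field_conflict_py_alt (cif_content : String) (alias_list : List String) (chosen_field : String) (chosen_value : String) : String × List String :=
  let aliases := PySem.List.dedup alias_list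
  let fval := pvB_formatted chosen_value
  let lines := (PySem.Str.split? cif_content "\n").getD []
  let r := pvB_render chosen_field fval (pvB_tag aliases lines false) true
  (PySem.Str.join "\n" r.1, r.2)

-- ===== PRECONDITION & SPEC =====
-- Pre_ excludes inputs where some line of cif_content (stripped) is matched by two distinct
-- aliases: there the alias name A reports in its change messages depends on Python's set
-- iteration order (hash order), which is accidental and not modelled.
def Pre_resolve_simple_field_conflict_py (cif_content : String) (alias_list : List String) (chosen_field : String) (chosen_value : String) : Prop :=
  ∀ line ∈ (PySem.Str.split? cif_content "\n").getD [],
    (PySem.List.dedup alias_list).countP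
      (fun a => PySem.Str.startswith (PySem.Str.strip line) (a ++ " ") || PySem.Str.strip line == a) ≤ 1
instance (cif_content : String) (alias_list : List String) (chosen_field : String) (chosen_value : String) : Decidable (Pre_resolve_simple_field_conflict_py cif_content alias_list chosen_field chosen_value) := by unfold Pre_resolve_simple_field_conflict_py; infer_instance

def pvWitness_resolve_simple_field_conflict_py : String × List String × String × String :=
  ("_cell_length_a 5.4\n_cell.length_a  5.4", ["_cell_length_a", "_cell.length_a"], "_cell.length_a", "5.4")

def Spec_resolve_simple_field_conflict_py (cif_content : String) (alias_list : List String) (chosen_field : String) (chosen_value : String) (out : String × List String) : Prop := out = resolve_simple_field_conflict_py_alt cif_content alias_list chosen_field chosen_value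
instance (cif_content : String) (alias_list : List String) (chosen_field : String) (chosen_value : String) (out : String × List String) : Decidable (Spec_resolve_simple_field_conflict_py cif_content alias_list chosen_field chosen_value out) := by unfold Spec_resolve_simple_field_conflict_py; infer_instance

-- ===== CLAIM (what is proved, stated in full; the proofs are below) =====
def Claim_equal_resolve_simple_field_conflict_py : Prop := ∀ (cif_content : String) (alias_list : List String) (chosen_field : String) (chosen_value : String), Dom_resolve_simple_field_conflict_py cif_content alias_list chosen_field chosen_value → Pre_resolve_simple_field_conflict_py cif_content alias_list chosen_field chosen_value → Spec_resolve_simple_field_conflict_py cif_content alias_list chosen_field chosen_value (resolve_simple_field_conflict_py cif_content alias_list chosen_field chosen_value)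

-- ===== LEMMAS AND PROOFS =====

theorem pv_formatted_eq (cv : String) : pvA_formatted cv = pvB_formatted cv := by
  unfold pvA_formatted pvB_formatted
  simp only [List.any_cons, List.any_nil, Bool.or_false]
  split_ifs <;> simp_all

theorem pv_loop_eq (fields : List String) (chosen_field fval : String)
    (lines : List String) (fr itb : Bool) :
    pvA_loop fields chosen_field fval lines fr itb =
      pvB_render chosen_field fval (pvB_tag fields lines itb) (!fr) := by
  induction lines, fr, itb using pvA_loop.induct fields chosen_field fval with
  | case1 fr itb => simp [pvA_loop, pvB_tag, pvB_render]
  | case2 line rest fr itb ls h ih =>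
    have h' : PySem.Str.strip line = ";" := h
    rw [pvB_tag.eq_def]
    simp [pvA_loop, pvB_render, h', ih]
  | case3 line rest fr ls h ih =>
    have h' : ¬ PySem.Str.strip line = ";" := h
    rw [pvB_tag.eq_def]
    simp [pvA_loop, pvB_render, h', ih]
  | case4 line rest fr itb ls h1 h2 hfind ih =>
    simp only [Bool.not_eq_true] at h2; subst h2
    have h1' : ¬ PySem.Str.strip line = ";" := h1
    have hpred : (fun a => PySem.Str.startswith (PySem.Str.strip line) (a ++ " ")
        || PySem.Str.strip line == a)
        = (fun a => PySem.Chars.startswith (PySem.Chars.strip line.toList) (a.toList ++ [' '])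
            || PySem.Str.strip line == a) := by funext a; simp
    have hfind' : List.find? (fun a => PySem.Chars.startswith (PySem.Chars.strip line.toList)
        (a.toList ++ [' ']) || PySem.Str.strip line == a) fields = none := by
      rw [← hpred]; exact hfind
    rw [pvB_tag.eq_def]
    simp [pvA_loop, pvB_render, h1', hfind', ih]
  | case5 line rest fr itb ls h1 h2 al hfind hfr ih =>
    simp only [Bool.not_eq_true'] at hfr; subst hfr
    simp only [Bool.not_eq_true] at h2; subst h2
    have h1' : ¬ PySem.Str.strip line = ";" := h1
    have hpred : (fun a => PySem.Str.startswith (PySem.Str.strip line) (a ++ " ")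
        || PySem.Str.strip line == a)
        = (fun a => PySem.Chars.startswith (PySem.Chars.strip line.toList) (a.toList ++ [' '])
            || PySem.Str.strip line == a) := by funext a; simp
    have hfind' : List.find? (fun a => PySem.Chars.startswith (PySem.Chars.strip line.toList)
        (a.toList ++ [' ']) || PySem.Str.strip line == a) fields = some al := by
      rw [← hpred]; exact hfind
    rw [pvB_tag.eq_def]
    cases rest with
    | nil =>
      simp [pvA_skipValue] at ih
      simp [pvA_loop, pvB_render, pvA_skipValue, h1', hfind', ih]
    | cons next tl =>
      by_cases hs : PySem.Chars.startswith (PySem.Chars.strip next.toList) ['_'] = true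
      all_goals simp [pvA_skipValue, hs] at ih
      all_goals simp [pvA_loop, pvB_render, pvA_skipValue, h1', hfind', hs, ih]
  | case6 line rest fr itb ls h1 h2 al hfind hfr ih =>
    simp only [Bool.not_eq_eq_eq_not, Bool.not_true, Bool.not_eq_false] at hfr; subst hfr
    simp only [Bool.not_eq_true] at h2; subst h2
    have h1' : ¬ PySem.Str.strip line = ";" := h1
    have hpred : (fun a => PySem.Str.startswith (PySem.Str.strip line) (a ++ " ")
        || PySem.Str.strip line == a)
        = (fun a => PySem.Chars.startswith (PySem.Chars.strip line.toList) (a.toList ++ [' '])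
            || PySem.Str.strip line == a) := by funext a; simp
    have hfind' : List.find? (fun a => PySem.Chars.startswith (PySem.Chars.strip line.toList)
        (a.toList ++ [' ']) || PySem.Str.strip line == a) fields = some al := by
      rw [← hpred]; exact hfind
    rw [pvB_tag.eq_def]
    cases rest with
    | nil =>
      simp [pvA_skipValue] at ih
      simp [pvA_loop, pvB_render, pvA_skipValue, h1', hfind', ih]
    | cons next tl =>
      by_cases hs : PySem.Chars.startswith (PySem.Chars.strip next.toList) ['_'] = true
      all_goals simp [pvA_skipValue, hs] at ih
      all_goals simp [pvA_loop, pvB_render, pvA_skipValue, h1', hfind', hs, ih]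

theorem resolve_simple_field_conflict_py_spec : Claim_equal_resolve_simple_field_conflict_py := by
  intro cif_content alias_list chosen_field chosen_value _ _
  unfold Spec_resolve_simple_field_conflict_py
  unfold resolve_simple_field_conflict_py resolve_simple_field_conflict_py_alt
  simp only [pv_formatted_eq, PySem.List.dedup_eq_ofList]
  rw [pv_loop_eq]
  norm_num
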